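-- pv_equiv track=rewrite | github.com/viahhh/git | py/第三章/E026_2227406015.py | assignment26
-- ===== SOURCE A (Python) =====
-- def assignment26(lst):
--     # 功能：对给定的列表lst，使得列表中不存在重复元素，也就是删除重复元素，只保留一份
--     # 例子：input:[1,3,4,6,6,7,8,8,10,21,22,22]
--     # result:[1,3,4,6,7,8,10,21,22]
--     for i in lst[::]:
--         if lst.count(i)>=2:
--             lst.remove(i)
--     for i in lst[::]:
--         if i >= 10:
--             lst.remove(i)
--     result=lst
--     return result
-- ===== SOURCE B (Python) =====
-- def assignment26(lst):
--     # One reverse pass with a seen-set: keep each value's last occurrence, drop values >= 10.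
--     # Mutates lst in place (lst[:] = result) and returns the same object, like A.
--     seen = set()
--     result = []
--     for x in reversed(lst):
--         if x not in seen:
--             seen.add(x)
--             if x < 10:
--                 result.append(x)
--     result.reverse()
--     lst[:] = result
--     return lst
-- ===== Notes on version B (the rewrite author's own statement) =====
-- stated objective: faster
-- what changed: Replaces A's two quadratic count/remove scanning loops with a single reverse pass over the list using a seen-set, emitting each value once (at its last occurrence) when it is < 10, then reversing the result.
import Mathlib
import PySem

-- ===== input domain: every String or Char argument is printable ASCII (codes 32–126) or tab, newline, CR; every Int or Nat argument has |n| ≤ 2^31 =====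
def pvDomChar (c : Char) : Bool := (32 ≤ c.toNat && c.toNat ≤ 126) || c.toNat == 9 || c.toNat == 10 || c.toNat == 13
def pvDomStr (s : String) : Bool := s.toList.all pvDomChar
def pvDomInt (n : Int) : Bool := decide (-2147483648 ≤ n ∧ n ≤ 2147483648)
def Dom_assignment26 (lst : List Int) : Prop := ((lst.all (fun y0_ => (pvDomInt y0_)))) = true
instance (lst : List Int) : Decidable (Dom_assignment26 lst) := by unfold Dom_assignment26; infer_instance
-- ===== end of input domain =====

-- B replaces A's two quadratic count/remove loops by one reverse pass with a seen-set
-- (keep last occurrence of each value, drop values ≥ 10); both A and B mutate lst in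
-- place to the same final contents, so return-value equality covers the side effect too.

-- ===== PORT A =====
-- first loop: for i in lst[::]: if lst.count(i) >= 2: lst.remove(i)
-- lst.remove(i) = List.erase (remove first occurrence); exact here because the guard
-- count ≥ 2 guarantees i ∈ lst, so Python never raises ValueError.
def pvDedupLoop : List Int → List Int → List Int
  | acc, [] => acc
  | acc, i :: rest => pvDedupLoop (if 2 ≤ acc.count i then acc.erase i else acc) rest

-- second loop: for i in lst[::]: if i >= 10: lst.remove(i)
-- exact: i is drawn from a copy of lst, and after dedup each value occurs once, so
-- lst.remove(i) always succeeds.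
def pvDropLoop : List Int → List Int → List Int
  | acc, [] => acc
  | acc, i :: rest => pvDropLoop (if 10 ≤ i then acc.erase i else acc) rest

def assignment26 (lst : List Int) : List Int :=
  let l1 := pvDedupLoop lst lst
  pvDropLoop l1 l1

-- ===== PORT B =====
-- for x in reversed(lst): if x not in seen: seen.add(x); if x < 10: result.append(x)
def pvAltLoop : PySem.Set Int → List Int → List Int → List Int
  | _, res, [] => res
  | seen, res, x :: xs =>
      if PySem.Set.contains seen x then pvAltLoop seen res xs
      else pvAltLoop (PySem.Set.add seen x) (if x < 10 then res ++ [x] else res) xs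

def assignment26_alt (lst : List Int) : List Int :=
  (pvAltLoop PySem.Set.empty [] lst.reverse).reverse

-- ===== PRECONDITION & SPEC =====
def Spec_assignment26 (lst : List Int) (out : List Int) : Prop := out = assignment26_alt lst
instance (lst : List Int) (out : List Int) : Decidable (Spec_assignment26 lst out) := by unfold Spec_assignment26; infer_instance

-- ===== CLAIM (what is proved, stated in full; the proofs are below) =====
def Claim_equal_assignment26 : Prop := ∀ (lst : List Int), Dom_assignment26 lst → Spec_assignment26 lst (assignment26 lst)

-- ===== LEMMAS AND PROOFS =====

-- `pvKeep p s` = the elements of p whose occurrence is the last one in p ++ s (order kept).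
def pvKeep : List Int → List Int → List Int
  | [], _ => []
  | x :: p, s => if x ∈ p ++ s then pvKeep p s else x :: pvKeep p s

theorem pvKeep_subset {y : Int} : ∀ {p s : List Int}, y ∈ pvKeep p s → y ∈ p := by
  intro p
  induction p with
  | nil => intro s h; simp [pvKeep] at h
  | cons x p ih =>
    intro s h
    simp only [pvKeep] at h
    split at h
    · exact List.mem_cons_of_mem _ (ih h)
    · rcases List.mem_cons.1 h with h | h
      · simp [h]
      · exact List.mem_cons_of_mem _ (ih h)

theorem pvKeep_not_mem {x : Int} : ∀ {p s : List Int}, x ∈ s → x ∉ pvKeep p s := by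
  intro p
  induction p with
  | nil => intro s _; simp [pvKeep]
  | cons y p ih =>
    intro s hx
    simp only [pvKeep]
    split
    · exact ih hx
    · rename_i hy
      intro hmem
      rcases List.mem_cons.1 hmem with h | h
      · exact hy (by simp [← h, hx])
      · exact ih hx h

theorem pvKeep_nodup : ∀ (p s : List Int), (pvKeep p s).Nodup := by
  intro p
  induction p with
  | nil => intro s; simp [pvKeep]
  | cons x p ih =>
    intro s
    simp only [pvKeep]
    split
    · exact ih s
    · rename_i hx
      refine List.nodup_cons.2 ⟨fun hmem => ?_, ih s⟩
      exact hx (List.mem_append.2 (Or.inl (pvKeep_subset hmem)))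

theorem pvKeep_append_mem {i : Int} : ∀ (p s : List Int), i ∈ s →
    pvKeep (p ++ [i]) s = pvKeep p (i :: s) := by
  intro p
  induction p with
  | nil => intro s hi; simp [pvKeep, hi]
  | cons x p ih =>
    intro s hi
    simp only [List.cons_append, pvKeep]
    have hcond : (x ∈ (p ++ [i]) ++ s) ↔ (x ∈ p ++ i :: s) := by
      simp [List.mem_append, or_left_comm]
    by_cases h : x ∈ p ++ i :: s
    · simp [h, ih s hi]
    · simp [h, ih s hi]

theorem pvKeep_append_not_mem {i : Int} : ∀ (p s : List Int), i ∉ s →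
    pvKeep (p ++ [i]) s = pvKeep p (i :: s) ++ [i] := by
  intro p
  induction p with
  | nil => intro s hi; simp [pvKeep, hi]
  | cons x p ih =>
    intro s hi
    simp only [List.cons_append, pvKeep]
    have hcond : (x ∈ (p ++ [i]) ++ s) ↔ (x ∈ p ++ i :: s) := by
      simp [List.mem_append, or_left_comm]
    by_cases h : x ∈ p ++ i :: s
    · simp [h, ih s hi]
    · simp [h, ih s hi]

-- A's first loop computes pvKeep: invariant over the remaining iteration list s.
theorem pvDedupLoop_eq : ∀ (s p : List Int),
    pvDedupLoop (pvKeep p s ++ s) s = pvKeep (p ++ s) [] := by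
  intro s
  induction s with
  | nil => intro p; simp [pvDedupLoop]
  | cons i s' ih =>
    intro p
    have hnm : i ∉ pvKeep p (i :: s') := pvKeep_not_mem (by simp)
    have hcount : (pvKeep p (i :: s') ++ i :: s').count i = 1 + s'.count i := by
      simp [List.count_append, List.count_eq_zero.2 hnm]
      omega
    have herase : (pvKeep p (i :: s') ++ i :: s').erase i = pvKeep p (i :: s') ++ s' := by
      rw [List.erase_append_right _ hnm, List.erase_cons_head]
    simp only [pvDedupLoop, hcount]
    by_cases hi : i ∈ s'
    · have h2 : 2 ≤ 1 + s'.count i := by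
        have := List.count_pos_iff.2 hi
        omega
      rw [if_pos h2, herase, ← pvKeep_append_mem p s' hi, ih (p ++ [i])]
      simp
    · have h0 : s'.count i = 0 := List.count_eq_zero.2 hi
      rw [if_neg (by omega)]
      have : pvKeep p (i :: s') ++ i :: s' = pvKeep (p ++ [i]) s' ++ s' := by
        rw [pvKeep_append_not_mem p s' hi]; simp
      rw [this, ih (p ++ [i])]
      simp

-- A's second loop filters < 10 on a duplicate-free list.
theorem pvDropLoop_eq : ∀ (s p : List Int), (p ++ s).Nodup →
    pvDropLoop (p.filter (· < 10) ++ s) s = (p ++ s).filter (· < 10) := by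
  intro s
  induction s with
  | nil => intro p _; simp [pvDropLoop]
  | cons i s' ih =>
    intro p hnd
    have hip : i ∉ p := by
      intro h
      exact (List.disjoint_of_nodup_append hnd) h (by simp)
    have hnd' : ((p ++ [i]) ++ s').Nodup := by
      have : (p ++ i :: s').Perm ((p ++ [i]) ++ s') := by
        simpa using (List.perm_middle (a := i) (l₁ := p) (l₂ := s')).symm
      exact this.nodup hnd
    have hif : i ∉ p.filter (· < 10) := fun h => hip (List.mem_of_mem_filter h)
    simp only [pvDropLoop]
    by_cases h10 : (10:Int) ≤ i
    · rw [if_pos h10]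
      have herase : (p.filter (· < 10) ++ i :: s').erase i = p.filter (· < 10) ++ s' := by
        rw [List.erase_append_right _ hif, List.erase_cons_head]
      have hfe : (p ++ [i]).filter (· < 10) = p.filter (· < 10) := by
        simp [List.filter_append]
        omega
      rw [herase, ← hfe, ih (p ++ [i]) hnd']
      simp
    · rw [if_neg h10]
      have hfe : (p ++ [i]).filter (· < 10) = p.filter (· < 10) ++ [i] := by
        simp [List.filter_append]
        omega
      have : p.filter (· < 10) ++ i :: s' = (p ++ [i]).filter (· < 10) ++ s' := by
        rw [hfe]; simp
      rw [this, ih (p ++ [i]) hnd']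
      simp

-- B-side: first-occurrence dedup of xs relative to a seen-set.
def pvDedupF : List Int → PySem.Set Int → List Int
  | [], _ => []
  | x :: xs, S => if PySem.Set.contains S x then pvDedupF xs S
                  else x :: pvDedupF xs (PySem.Set.add S x)

theorem pvAltLoop_eq : ∀ (xs : List Int) (S : PySem.Set Int) (res : List Int),
    pvAltLoop S res xs = res ++ (pvDedupF xs S).filter (· < 10) := by
  intro xs
  induction xs with
  | nil => intro S res; simp [pvAltLoop, pvDedupF]
  | cons x xs ih =>
    intro S res
    simp only [pvAltLoop, pvDedupF]
    by_cases h : PySem.Set.contains S x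
    · have hm : x ∈ S := (PySem.Set.contains_iff _ _).1 h
      simp [hm, ih]
    · have hm : x ∉ S := fun m => h ((PySem.Set.contains_iff _ _).2 m)
      simp only [h, Bool.false_eq_true, if_false, ih]
      by_cases h10 : x < 10
      · simp [h10]
      · simp [h10]

theorem pvDedupF_append : ∀ (a : List Int) (x : Int) (S : PySem.Set Int),
    pvDedupF (a ++ [x]) S =
      pvDedupF a S ++ (if PySem.Set.contains S x ∨ x ∈ a then [] else [x]) := by
  intro a
  induction a with
  | nil => intro x S; simp [pvDedupF]
  | cons y a ih =>
    intro x S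
    simp only [List.cons_append, pvDedupF]
    by_cases hy : PySem.Set.contains S y
    · rw [if_pos hy, if_pos hy, ih x S]
      have hmemS : y ∈ S := (PySem.Set.contains_iff _ _).1 hy
      by_cases hxy : x = y
      · have hin : x ∈ S := hxy ▸ hmemS
        simp [hin]
      · have : (x ∈ y :: a) ↔ (x ∈ a) := by simp [hxy]
        simp [this]
    · rw [if_neg hy, if_neg hy, ih x (PySem.Set.add S y)]
      have hca : PySem.Set.contains (PySem.Set.add S y) x = true ↔ (x ∈ S ∨ x = y) := by
        rw [PySem.Set.contains_iff, PySem.Set.mem_add]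
      have hcS : PySem.Set.contains S x = true ↔ x ∈ S := PySem.Set.contains_iff _ _
      by_cases hc : PySem.Set.contains (PySem.Set.add S y) x = true ∨ x ∈ a
      · have hc' : PySem.Set.contains S x = true ∨ x ∈ y :: a := by
          rcases hc with hc | hc
          · rcases hca.1 hc with h | h
            · exact Or.inl (hcS.2 h)
            · exact Or.inr (by simp [h])
          · exact Or.inr (by simp [hc])
        simp only [if_pos hc, if_pos hc', List.append_nil]
      · have hc' : ¬ (PySem.Set.contains S x = true ∨ x ∈ y :: a) := by
          intro h
          apply hc
          rcases h with h | h
          · exact Or.inl (hca.2 (Or.inl (hcS.1 h)))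
          · rcases List.mem_cons.1 h with h | h
            · exact Or.inl (hca.2 (Or.inr h))
            · exact Or.inr h
        simp only [if_neg hc, if_neg hc', List.cons_append]

-- pvKeep with the tail condition carried as a seen-set.
def pvKeepS : List Int → PySem.Set Int → List Int
  | [], _ => []
  | x :: p, S => if x ∈ p ∨ PySem.Set.contains S x then pvKeepS p S else x :: pvKeepS p S

theorem pvDedupF_reverse : ∀ (p : List Int) (S : PySem.Set Int),
    pvDedupF p.reverse S = (pvKeepS p S).reverse := by
  intro p
  induction p with
  | nil => intro S; simp [pvDedupF, pvKeepS]
  | cons x p ih =>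
    intro S
    simp only [List.reverse_cons, pvKeepS]
    rw [pvDedupF_append p.reverse x S, ih S]
    by_cases hc : x ∈ p ∨ PySem.Set.contains S x
    · have h1 : PySem.Set.contains S x = true ∨ x ∈ p.reverse := by
        rcases hc with h | h
        · exact Or.inr (by simp [h])
        · exact Or.inl h
      rw [if_pos h1, if_pos hc]
      simp
    · have h1 : ¬ (PySem.Set.contains S x = true ∨ x ∈ p.reverse) := by
        intro h
        apply hc
        rcases h with h | h
        · exact Or.inr h
        · exact Or.inl (by simpa using h)
      rw [if_neg h1, if_neg hc]
      simp

theorem pvKeepS_empty : ∀ (p : List Int), pvKeepS p PySem.Set.empty = pvKeep p [] := by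
  intro p
  induction p with
  | nil => rfl
  | cons x p ih =>
    have hc : PySem.Set.contains PySem.Set.empty x = false := rfl
    simp only [pvKeepS, pvKeep, List.append_nil, hc, Bool.false_eq_true, or_false, ih]

theorem assignment26_eq_filter_keep (lst : List Int) :
    assignment26 lst = (pvKeep lst []).filter (· < 10) := by
  unfold assignment26
  have h1 : pvDedupLoop lst lst = pvKeep lst [] := by
    have := pvDedupLoop_eq lst []
    simpa [pvKeep] using this
  rw [h1]
  have := pvDropLoop_eq (pvKeep lst []) []
  simpa using this (by simpa using pvKeep_nodup lst [])

theorem assignment26_alt_eq_filter_keep (lst : List Int) :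
    assignment26_alt lst = (pvKeep lst []).filter (· < 10) := by
  unfold assignment26_alt
  rw [pvAltLoop_eq, pvDedupF_reverse lst PySem.Set.empty, pvKeepS_empty]
  simp [List.filter_reverse]

-- ===== VERDICT (by name: the statement is the Claim_ definition above) =====
theorem assignment26_spec : Claim_equal_assignment26 := by
  intro lst _
  unfold Spec_assignment26
  rw [assignment26_eq_filter_keep, assignment26_alt_eq_filter_keep]
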